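-- pv_equiv track=rewrite | github.com/MassimoLauria/adventofcode | 2023/code13.py | into_int
-- ===== SOURCE A (Python) =====
-- def into_int(block):
--     nums=[]
--     for line in block:
--         i=0
--         for c in line:
--             i = i<<1 | (c=='#')
--         nums.append(i)
--     return nums
-- ===== SOURCE B (Python) =====
-- def into_int(block):
--     out = []
--     for line in block:
--         val = 0
--         place = 1
--         for c in reversed(line):
--             if c == '#':
--                 val += place
--             place *= 2
--         out.append(val)
--     return out
-- ===== Notes on version B (the rewrite author's own statement) =====
-- stated objective: alternative
-- what changed: Replaces the left-to-right shift-and-OR accumulator with a back-to-front scan that adds an explicitly maintained power-of-two place value for each '#', so no shifting or bitwise OR is used.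
import Mathlib
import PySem

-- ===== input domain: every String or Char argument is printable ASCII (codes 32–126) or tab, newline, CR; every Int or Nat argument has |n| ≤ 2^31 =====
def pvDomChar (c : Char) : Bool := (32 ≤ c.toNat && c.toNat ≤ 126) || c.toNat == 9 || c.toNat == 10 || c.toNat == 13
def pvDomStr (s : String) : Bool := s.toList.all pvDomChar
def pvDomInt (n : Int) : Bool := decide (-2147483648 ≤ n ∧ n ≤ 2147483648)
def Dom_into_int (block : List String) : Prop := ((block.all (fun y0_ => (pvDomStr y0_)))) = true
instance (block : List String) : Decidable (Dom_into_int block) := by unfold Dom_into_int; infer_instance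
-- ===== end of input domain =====

-- B replaces A's left-to-right shift-and-OR accumulator by a back-to-front scan that
-- adds an explicitly maintained power-of-two place value for each '#' (objective: alternative).

-- ===== PORT A =====
-- for line in block: i=0; for c in line: i = i<<1 | (c=='#'); nums.append(i)
def into_int (block : List String) : List Int :=
  block.foldl
    (fun nums line =>
      nums ++ [line.toList.foldl
        (fun i c => PySem.Int.bor (i <<< (1 : Nat)) (if c = '#' then 1 else 0)) 0])
    []

-- ===== PORT B =====
-- for c in reversed(line): if c=='#': val += place; place *= 2
def into_int_alt (block : List String) : List Int :=
  block.foldl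
    (fun out line =>
      out ++ [(line.toList.reverse.foldl
        (fun (s : Int × Int) c => (if c = '#' then s.1 + s.2 else s.1, s.2 * 2))
        (0, 1)).1])
    []

-- ===== PRECONDITION & SPEC =====
def Spec_into_int (block : List String) (out : List Int) : Prop := out = into_int_alt block
instance (block : List String) (out : List Int) : Decidable (Spec_into_int block out) := by unfold Spec_into_int; infer_instance

-- ===== CLAIM (what is proved, stated in full; the proofs are below) =====
def Claim_equal_into_int : Prop := ∀ (block : List String), Dom_into_int block → Spec_into_int block (into_int block)

-- ===== LEMMAS AND PROOFS =====

-- value of a bit list read most-significant-first (A's traversal order)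
def pvValL : List Char → Int
  | [] => 0
  | c :: t => (if c = '#' then 1 else 0) * 2 ^ t.length + pvValL t

-- value of a bit list read least-significant-first (B's traversal order)
def pvValR : List Char → Int
  | [] => 0
  | c :: t => (if c = '#' then 1 else 0) + 2 * pvValR t

theorem pv_nat_lor_bit (m b : Nat) (hb : b ≤ 1) : (2 * m) ||| b = 2 * m + b := by
  interval_cases b
  · simp
  · apply Nat.eq_of_testBit_eq
    intro i
    rw [Nat.testBit_lor]
    cases i with
    | zero => simp [Nat.mul_comm]
    | succ j =>
        rw [Nat.testBit_succ, Nat.testBit_succ, Nat.testBit_succ]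
        have h1 : 2 * m / 2 = m := by omega
        have h2 : (2 * m + 1) / 2 = m := by omega
        have h3 : (1 : Nat) / 2 = 0 := by omega
        simp [h1, h2, h3]

theorem pv_bor_step (i : Int) (hi : 0 ≤ i) (b : Int) (hb : b = 0 ∨ b = 1) :
    PySem.Int.bor (i <<< (1 : Nat)) b = 2 * i + b := by
  obtain ⟨m, rfl⟩ := Int.eq_ofNat_of_zero_le hi
  have hsh : ((m : Int) <<< (1 : Nat)) = ((m <<< 1 : Nat) : Int) := by
    simp [Int.natCast_shiftLeft]
  have hm : m <<< 1 = 2 * m := by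
    rw [Nat.shiftLeft_eq]; ring
  rcases hb with rfl | rfl
  · rw [hsh, hm, show (0 : Int) = ((0 : Nat) : Int) from rfl, PySem.Int.bor_natCast]
    simp
  · rw [hsh, hm, show (1 : Int) = ((1 : Nat) : Int) from rfl, PySem.Int.bor_natCast,
      pv_nat_lor_bit m 1 (by omega)]
    push_cast; ring

-- A's inner fold computes acc * 2^len + big-endian value
theorem pv_lineA (cs : List Char) : ∀ (i : Int), 0 ≤ i →
    cs.foldl (fun i c => PySem.Int.bor (i <<< (1 : Nat)) (if c = '#' then 1 else 0)) i
      = i * 2 ^ cs.length + pvValL cs := by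
  induction cs with
  | nil => intro i _; simp [pvValL]
  | cons c t ih =>
      intro i hi
      have hb : (if c = '#' then (1:Int) else 0) = 0 ∨ (if c = '#' then (1:Int) else 0) = 1 := by
        split_ifs <;> simp
      have hnn : 0 ≤ 2 * i + (if c = '#' then (1:Int) else 0) := by
        rcases hb with h | h <;> rw [h] <;> omega
      simp only [List.foldl_cons, pv_bor_step i hi _ hb, ih _ hnn, pvValL, List.length_cons]
      ring

-- B's inner fold computes (v + p * little-endian value, p * 2^len)
theorem pv_lineB (cs : List Char) : ∀ (v p : Int),
    cs.foldl (fun (s : Int × Int) c => (if c = '#' then s.1 + s.2 else s.1, s.2 * 2)) (v, p)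
      = (v + p * pvValR cs, p * 2 ^ cs.length) := by
  induction cs with
  | nil => intro v p; simp [pvValR]
  | cons c t ih =>
      intro v p
      simp only [List.foldl_cons, ih, pvValR, List.length_cons]
      split_ifs <;> refine Prod.ext ?_ ?_ <;> simp <;> ring

theorem pv_valR_append (xs : List Char) (c : Char) :
    pvValR (xs ++ [c]) = pvValR xs + (if c = '#' then 1 else 0) * 2 ^ xs.length := by
  induction xs with
  | nil => simp [pvValR]
  | cons x t ih => simp only [List.cons_append, pvValR, ih, List.length_cons]; ring

theorem pv_valR_reverse (cs : List Char) : pvValR cs.reverse = pvValL cs := by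
  induction cs with
  | nil => rfl
  | cons c t ih =>
      simp only [List.reverse_cons, pv_valR_append, ih, pvValL, List.length_reverse]
      ring

theorem pv_line_eq (line : String) :
    line.toList.foldl (fun i c => PySem.Int.bor (i <<< (1 : Nat)) (if c = '#' then 1 else 0)) 0
      = (line.toList.reverse.foldl
          (fun (s : Int × Int) c => (if c = '#' then s.1 + s.2 else s.1, s.2 * 2)) (0, 1)).1 := by
  rw [pv_lineA line.toList 0 le_rfl, pv_lineB]
  simp [pv_valR_reverse]

theorem pv_outer (f g : String → Int) (h : ∀ s, f s = g s) (block : List String) :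
    ∀ (acc : List Int),
    block.foldl (fun nums line => nums ++ [f line]) acc
      = block.foldl (fun out line => out ++ [g line]) acc := by
  induction block with
  | nil => intro acc; rfl
  | cons s t ih => intro acc; simp only [List.foldl_cons, h s, ih]

-- ===== VERDICT (by name: the statement is the Claim_ definition above) =====
theorem into_int_spec : Claim_equal_into_int := by
  intro block _
  unfold Spec_into_int into_int into_int_alt
  exact pv_outer _ _ pv_line_eq block []
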